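-- pv_equiv track=rewrite | github.com/fadhilatulistiqomah/monitoring_cuaca_ekstrem | download_harian.py | ambil_sandi63
-- ===== SOURCE A (Python) =====
-- def ambil_sandi63(teks):
--     if not isinstance(teks, str):
--         return None
--     tokens = teks.split()
--     for t in tokens:
--         if t.startswith('6'):
--             return t
--     return None
-- ===== SOURCE B (Python) =====
-- def ambil_sandi63(teks):
--     if not isinstance(teks, str):
--         return None
--     i, n = 0, len(teks)
--     while i < n:
--         if teks[i].isspace():
--             i += 1
--         else:
--             j = i
--             while j < n and not teks[j].isspace():
--                 j += 1
--             if teks[i] == '6':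
--                 return teks[i:j]
--             i = j
--     return None
-- ===== Notes on version B (the rewrite author's own statement) =====
-- stated objective: alternative
-- what changed: B replaces A's materialise-all-tokens-with-split-then-loop by a single in-place character scan that skips whitespace, delimits each token by index, and tests only its first character.
import Mathlib
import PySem

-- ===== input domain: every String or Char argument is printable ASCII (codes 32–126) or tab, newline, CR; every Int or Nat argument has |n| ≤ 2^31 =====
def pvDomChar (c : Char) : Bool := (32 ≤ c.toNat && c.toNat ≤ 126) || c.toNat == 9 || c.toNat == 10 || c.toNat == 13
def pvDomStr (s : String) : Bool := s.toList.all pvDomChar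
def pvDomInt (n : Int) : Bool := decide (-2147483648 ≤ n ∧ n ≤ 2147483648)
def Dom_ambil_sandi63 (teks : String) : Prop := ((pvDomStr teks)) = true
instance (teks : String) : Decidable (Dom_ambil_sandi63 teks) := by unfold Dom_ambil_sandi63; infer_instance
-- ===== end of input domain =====

-- B replaces A's split-into-tokens-then-loop with a single character-level scan
-- (skip whitespace, find the token's end, test its first char); objective: alternative.

-- ===== PORT A =====
-- the 'for t in tokens: if t.startswith('6'): return t' loop of A
def pvFindTok : List String → Option String
  | [] => none
  | t :: ts => if PySem.Str.startswith t "6" then some t else pvFindTok ts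

def ambil_sandi63 (teks : String) : Option String :=
  pvFindTok (PySem.Str.split₀ teks)

-- ===== PORT B =====
-- B's outer while loop over the characters of teks: skip a whitespace char, or
-- find the end of the token (the inner while = takeWhile/dropWhile), test its first char.
def pvScan : List Char → Option String
  | [] => none
  | c :: rest =>
    if PySem.Chars.isspace c then pvScan rest
    else if c = '6' then some (String.ofList (c :: rest.takeWhile (fun d => !PySem.Chars.isspace d)))
    else pvScan (rest.dropWhile (fun d => !PySem.Chars.isspace d))
termination_by l => l.length
decreasing_by
  · simp
  · exact Nat.lt_succ_of_le (List.length_dropWhile_le _ _)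

def ambil_sandi63_alt (teks : String) : Option String :=
  pvScan teks.toList

-- ===== PRECONDITION & SPEC =====
def Spec_ambil_sandi63 (teks : String) (out : Option String) : Prop := out = ambil_sandi63_alt teks
instance (teks : String) (out : Option String) : Decidable (Spec_ambil_sandi63 teks out) := by unfold Spec_ambil_sandi63; infer_instance

-- ===== CLAIM (what is proved, stated in full; the proofs are below) =====
def Claim_equal_ambil_sandi63 : Prop := ∀ (teks : String), Dom_ambil_sandi63 teks → Spec_ambil_sandi63 teks (ambil_sandi63 teks)

-- ===== LEMMAS AND PROOFS =====

-- split₀.go with a non-empty accumulator prepends the accumulated words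
lemma go_acc (s : List Char) : ∀ (cur : List Char) (acc : List (List Char)),
    PySem.Chars.split₀.go s cur acc = acc.reverse ++ PySem.Chars.split₀.go s cur [] := by
  induction s with
  | nil =>
    intro cur acc
    simp only [PySem.Chars.split₀.go]
    by_cases h : cur.isEmpty <;> simp [h]
  | cons c rest ih =>
    intro cur acc
    simp only [PySem.Chars.split₀.go]
    by_cases hs : PySem.Chars.isspace c
    · by_cases h : cur.isEmpty = true
      · simp only [hs, h, if_true]
        exact ih [] acc
      · simp only [hs, h, if_true]
        rw [ih [] (cur.reverse :: acc), ih [] [cur.reverse]]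
        simp
    · simp only [hs, Bool.false_eq_true, if_false]
      exact ih (c :: cur) acc

-- split₀.go while building a word: the word is cur.reverse ++ the takeWhile of s
lemma go_token (s : List Char) : ∀ (cur : List Char), cur ≠ [] →
    PySem.Chars.split₀.go s cur [] =
      (cur.reverse ++ s.takeWhile (fun d => !PySem.Chars.isspace d)) ::
        PySem.Chars.split₀.go (s.dropWhile (fun d => !PySem.Chars.isspace d)) [] [] := by
  induction s with
  | nil =>
    intro cur hcur
    simp [PySem.Chars.split₀.go, List.isEmpty_iff, hcur]
  | cons c rest ih =>
    intro cur hcur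
    by_cases hs : PySem.Chars.isspace c
    · have h1 : PySem.Chars.split₀.go (c :: rest) cur [] = PySem.Chars.split₀.go rest [] [cur.reverse] := by
        simp [PySem.Chars.split₀.go, hs, List.isEmpty_iff, hcur]
      rw [h1, go_acc]
      simp [hs, PySem.Chars.split₀.go]
    · have h1 : PySem.Chars.split₀.go (c :: rest) cur [] = PySem.Chars.split₀.go rest (c :: cur) [] := by
        simp [PySem.Chars.split₀.go, hs]
      rw [h1, ih (c :: cur) (by simp)]
      simp [hs]

-- the recursive characterisation of Python's str.split()
lemma split₀_cons (c : Char) (rest : List Char) :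
    PySem.Chars.split₀ (c :: rest) =
      if PySem.Chars.isspace c then PySem.Chars.split₀ rest
      else (c :: rest.takeWhile (fun d => !PySem.Chars.isspace d)) ::
             PySem.Chars.split₀ (rest.dropWhile (fun d => !PySem.Chars.isspace d)) := by
  by_cases hs : PySem.Chars.isspace c
  · simp [PySem.Chars.split₀, PySem.Chars.split₀.go, hs]
  · simp only [PySem.Chars.split₀, hs, Bool.false_eq_true, if_false]
    have : PySem.Chars.split₀.go (c :: rest) [] [] = PySem.Chars.split₀.go rest [c] [] := by
      simp [PySem.Chars.split₀.go, hs]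
    rw [this, go_token rest [c] (by simp)]
    simp

-- A's token loop over split() equals B's character scan
lemma main_lemma : ∀ (n : Nat) (s : List Char), s.length ≤ n →
    pvFindTok ((PySem.Chars.split₀ s).map String.ofList) = pvScan s := by
  intro n
  induction n with
  | zero =>
    intro s hs
    have : s = [] := List.eq_nil_of_length_eq_zero (Nat.le_zero.mp hs)
    subst this
    simp [PySem.Chars.split₀, PySem.Chars.split₀.go, pvFindTok, pvScan]
  | succ n ih =>
    intro s hs
    match s with
    | [] => simp [PySem.Chars.split₀, PySem.Chars.split₀.go, pvFindTok, pvScan]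
    | c :: rest =>
      rw [split₀_cons]
      by_cases hsp : PySem.Chars.isspace c
      · rw [if_pos hsp, pvScan]
        rw [if_pos hsp]
        exact ih rest (by simpa using Nat.lt_succ_iff.mp (Nat.lt_of_lt_of_le (by simp) hs))
      · rw [if_neg hsp]
        have hstart : PySem.Str.startswith
            (String.ofList (c :: rest.takeWhile (fun d => !PySem.Chars.isspace d))) "6"
            = decide (c = '6') := by
          simp only [PySem.Str.startswith, PySem.Chars.startswith]
          by_cases h6 : c = '6'
          · subst h6; simp [List.isPrefixOf]
          · simp [List.isPrefixOf, h6, Ne.symm h6]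
        simp only [List.map_cons, pvFindTok, hstart]
        rw [pvScan]
        rw [if_neg hsp]
        by_cases h6 : c = '6'
        · simp [h6]
        · simp only [h6, decide_false, Bool.false_eq_true, if_false]
          exact ih _ (Nat.le_trans (List.length_dropWhile_le _ _)
            (by simpa using Nat.succ_le_succ_iff.mp (by simpa using hs)))

-- ===== VERDICT (by name: the statement is the Claim_ definition above) =====
theorem ambil_sandi63_spec : Claim_equal_ambil_sandi63 := by
  intro teks _
  unfold Spec_ambil_sandi63 ambil_sandi63 ambil_sandi63_alt
  simp only [PySem.Str.split₀]
  exact main_lemma teks.toList.length teks.toList le_rfl
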